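-- pv_equiv track=rewrite | github.com/WeeYoungSeok/algorithm-study | BOJ/brute_Force/BOJ_12919.py | list_find
-- ===== SOURCE A (Python) =====
-- def list_find(current_t: list, s: list):
--     if current_t == s:
--         return True
--     if len(current_t) <= len(s) or (current_t[0] == "A" and current_t[-1] == "B"):
--         return False
--
--     if current_t[0] == "B":
--         if list_find(current_t[1:][::-1], s):
--             return True
--     if current_t[-1] == "A":
--         if list_find(current_t[:-1], s):
--             return True
--     return False
-- ===== SOURCE B (Python) =====
-- def list_find(current_t: list, s: list):
--     stack = [current_t]
--     while stack:
--         x = stack.pop()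
--         if x == s:
--             return True
--         if len(x) <= len(s) or (x[0] == "A" and x[-1] == "B"):
--             continue
--         if x[-1] == "A":
--             stack.append(x[:-1])
--         if x[0] == "B":
--             stack.append(x[1:][::-1])
--     return False
-- ===== Notes on version B (the rewrite author's own statement) =====
-- stated objective: alternative
-- what changed: Replaced the recursive backtracking search by an iterative depth-first search over an explicit stack of pending states, with the same pruning guards; the Boolean result is order-independent so the traversal order change does not affect the answer.
import Mathlib
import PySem

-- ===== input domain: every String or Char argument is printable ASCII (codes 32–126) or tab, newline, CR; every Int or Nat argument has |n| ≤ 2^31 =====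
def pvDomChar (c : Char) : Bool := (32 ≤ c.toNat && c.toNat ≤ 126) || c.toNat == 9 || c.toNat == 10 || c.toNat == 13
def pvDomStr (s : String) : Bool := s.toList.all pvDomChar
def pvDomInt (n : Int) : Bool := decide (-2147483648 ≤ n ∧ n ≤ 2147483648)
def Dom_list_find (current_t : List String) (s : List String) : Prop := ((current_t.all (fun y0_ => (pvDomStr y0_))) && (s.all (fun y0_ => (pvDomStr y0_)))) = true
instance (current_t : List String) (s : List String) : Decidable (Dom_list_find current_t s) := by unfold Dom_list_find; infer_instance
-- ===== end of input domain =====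

-- B replaces A's recursive backtracking search by an iterative DFS over an explicit stack (alternative decomposition, same pruning).


-- ===== PORT A =====
-- literal port of A's recursion; current_t[1:][::-1] is (slice 1:).reverse (PySem.List.slice?_none_none_neg_one)
def list_find (current_t : List String) (s : List String) : Bool :=
  if current_t = s then true
  else if h2 : current_t.length ≤ s.length ∨
      (PySem.List.pyGet? current_t 0 = some "A" ∧ PySem.List.pyGet? current_t (-1) = some "B") then
    false
  else
    (if PySem.List.pyGet? current_t 0 = some "B" then
        list_find (PySem.List.slice current_t (some 1) none).reverse s else false)
    || (if PySem.List.pyGet? current_t (-1) = some "A" then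
        list_find (PySem.List.slice current_t none (some (-1))) s else false)
termination_by current_t.length
decreasing_by
  · simp [PySem.List.slice_from_one]; omega
  · simp [PySem.List.slice_to_neg_one]; omega

-- ===== PORT B =====
-- termination measure bound for the stack loop, cited by decreasing_by
theorem lf_pow_lem (n : Nat) (h : 1 ≤ n) : 3 ^ (n - 1) + 3 ^ (n - 1) < 3 ^ n := by
  have h1 : 3 ^ n = 3 ^ (n - 1) * 3 := by
    rw [← pow_succ]; congr 1; omega
  have h2 : 0 < 3 ^ (n - 1) := pow_pos (by omega : (0:Nat) < 3) _
  omega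

-- B's while-loop over the explicit stack (head of the list = top of the stack; the two
-- sequential appends of Source B are expanded into the four explicit push combinations)
def lfLoop (s : List String) (stack : List (List String)) : Bool :=
  match stack with
  | [] => false
  | x :: rest =>
    if x = s then true
    else if hp : x.length ≤ s.length ∨
        (PySem.List.pyGet? x 0 = some "A" ∧ PySem.List.pyGet? x (-1) = some "B") then
      lfLoop s rest
    else
      if PySem.List.pyGet? x (-1) = some "A" then
        if PySem.List.pyGet? x 0 = some "B" then
          lfLoop s ((PySem.List.slice x (some 1) none).reverse
                     :: PySem.List.slice x none (some (-1)) :: rest)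
        else lfLoop s (PySem.List.slice x none (some (-1)) :: rest)
      else
        if PySem.List.pyGet? x 0 = some "B" then
          lfLoop s ((PySem.List.slice x (some 1) none).reverse :: rest)
        else lfLoop s rest
termination_by (stack.map (fun y => 3 ^ y.length)).sum
decreasing_by
  · simp
  · have h1 := lf_pow_lem x.length (by omega)
    simp [PySem.List.slice_from_one, PySem.List.slice_to_neg_one]; omega
  · have h1 := lf_pow_lem x.length (by omega)
    have h2 : 0 < 3 ^ x.length := pow_pos (by omega : (0:Nat) < 3) _
    simp [PySem.List.slice_to_neg_one]; omega
  · have h1 := lf_pow_lem x.length (by omega)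
    have h2 : 0 < 3 ^ x.length := pow_pos (by omega : (0:Nat) < 3) _
    simp [PySem.List.slice_from_one]; omega
  · simp

def list_find_alt (current_t : List String) (s : List String) : Bool :=
  lfLoop s [current_t]

-- ===== PRECONDITION & SPEC =====
def Spec_list_find (current_t : List String) (s : List String) (out : Bool) : Prop := out = list_find_alt current_t s
instance (current_t : List String) (s : List String) (out : Bool) : Decidable (Spec_list_find current_t s out) := by unfold Spec_list_find; infer_instance

-- ===== CLAIM (what is proved, stated in full; the proofs are below) =====
def Claim_equal_list_find : Prop := ∀ (current_t : List String) (s : List String), Dom_list_find current_t s → Spec_list_find current_t s (list_find current_t s)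

-- ===== LEMMAS AND PROOFS =====
-- invariant of the stack loop: it answers whether ANY pending state succeeds
theorem lfLoop_eq_any (s : List String) (stack : List (List String)) :
    lfLoop s stack = stack.any (fun x => list_find x s) := by
  fun_induction lfLoop s stack with
  | case1 => simp
  | case2 rest =>
    have h : list_find s s = true := by rw [list_find.eq_def]; simp
    simp [h]
  | case3 x rest hx hp ih =>
    have h : list_find x s = false := by rw [list_find.eq_def]; simp [hx, hp]
    rw [ih]; simp [h]
  | case4 x rest hx hp hA hB ih =>
    have h : list_find x s =
        (list_find (PySem.List.slice x (some 1) none).reverse s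
          || list_find (PySem.List.slice x none (some (-1))) s) := by
      rw [list_find.eq_def, if_neg hx, dif_neg hp, if_pos hB, if_pos hA]
    rw [ih]; simp [h, Bool.or_assoc]
  | case5 x rest hx hp hA hB ih =>
    have h : list_find x s = list_find (PySem.List.slice x none (some (-1))) s := by
      rw [list_find.eq_def, if_neg hx, dif_neg hp, if_neg hB, if_pos hA]; simp
    rw [ih]; simp [h]
  | case6 x rest hx hp hA hB ih =>
    have h : list_find x s = list_find (PySem.List.slice x (some 1) none).reverse s := by
      rw [list_find.eq_def, if_neg hx, dif_neg hp, if_pos hB, if_neg hA]; simp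
    rw [ih]; simp [h]
  | case7 x rest hx hp hA hB ih =>
    have h : list_find x s = false := by
      rw [list_find.eq_def, if_neg hx, dif_neg hp, if_neg hB, if_neg hA]; simp
    rw [ih]; simp [h]

-- ===== VERDICT (by name: the statement is the Claim_ definition above) =====
theorem list_find_spec : Claim_equal_list_find := by
  intro current_t s _
  unfold Spec_list_find list_find_alt
  rw [lfLoop_eq_any]
  simp
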